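-- pv_equiv track=rewrite | github.com/YouvenZ/youvenz.github.io | bibtex_to_hugo.py | replace_special_characters
-- ===== SOURCE A (Python) =====
-- def replace_special_characters(text):
--     """Replace LaTeX-style special characters with Unicode."""
--     # Common LaTeX-style accented characters
--     replacements = {
--         "{\\\'e}": "é", "{\\\'E}": "É",
--         "{\\`e}": "è", "{\\`E}": "È",
--         "{\\^e}": "ê", "{\\^E}": "Ê",
--         "{\\\"e}": "ë", "{\\\"E}": "Ë",
--
--         "{\'e}": "é", "{\'E}": "É",
--         "{`e}": "è", "{`E}": "È",
--         "{^e}": "ê", "{^E}": "Ê",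
--         "{\"e}": "ë", "{\"E}": "Ë",
--
--         "\\\'e": "é", "\\\'E": "É",
--         "\\`e": "è", "\\`E": "È",
--         "\\^e": "ê", "\\^E": "Ê",
--         "\\\"e": "ë", "\\\"E": "Ë",
--
--         # Add more replacements as needed for other characters
--         # French
--         "{\\\'a}": "á", "{\\\'A}": "Á",
--         "{\\`a}": "à", "{\\`A}": "À",
--         "{\\^a}": "â", "{\\^A}": "Â",
--         "{\\\"a}": "ä", "{\\\"A}": "Ä",
--         "{\\\'i}": "í", "{\\\'I}": "Í",
--         "{\\`i}": "ì", "{\\`I}": "Ì",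
--         "{\\^i}": "î", "{\\^I}": "Î",
--         "{\\\"i}": "ï", "{\\\"I}": "Ï",
--         "{\\\'o}": "ó", "{\\\'O}": "Ó",
--         "{\\`o}": "ò", "{\\`O}": "Ò",
--         "{\\^o}": "ô", "{\\^O}": "Ô",
--         "{\\\"o}": "ö", "{\\\"O}": "Ö",
--         "{\\\'u}": "ú", "{\\\'U}": "Ú",
--         "{\\`u}": "ù", "{\\`U}": "Ù",
--         "{\\^u}": "û", "{\\^U}": "Û",
--         "{\\\"u}": "ü", "{\\\"U}": "Ü",
--         "{\\c c}": "ç", "{\\c C}": "Ç",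
--
--         "{\'a}": "á", "{\'A}": "Á",
--         "{`a}": "à", "{`A}": "À",
--         "{^a}": "â", "{^A}": "Â",
--         "{\"a}": "ä", "{\"A}": "Ä",
--         "{\'i}": "í", "{\'I}": "Í",
--         "{`i}": "ì", "{`I}": "Ì",
--         "{^i}": "î", "{^I}": "Î",
--         "{\"i}": "ï", "{\"I}": "Ï",
--         "{\'o}": "ó", "{\'O}": "Ó",
--         "{`o}": "ò", "{`O}": "Ò",
--         "{^o}": "ô", "{^O}": "Ô",
--         "{\"o}": "ö", "{\"O}": "Ö",
--         "{\'u}": "ú", "{\'U}": "Ú",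
--         "{`u}": "ù", "{`U}": "Ù",
--         "{^u}": "û", "{^U}": "Û",
--         "{\"u}": "ü", "{\"U}": "Ü",
--         "{c c}": "ç", "{c C}": "Ç",
--
--         "\\\'a": "á", "\\\'A": "Á",
--         "\\`a": "à", "\\`A": "À",
--         "\\^a": "â", "\\^A": "Â",
--         "\\\"a": "ä", "\\\"A": "Ä",
--         "\\\'i": "í", "\\\'I": "Í",
--         "\\`i": "ì", "\\`I": "Ì",
--         "\\^i": "î", "\\^I": "Î",
--         "\\\"i": "ï", "\\\"I": "Ï",
--         "\\\'o": "ó", "\\\'O": "Ó",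
--         "\\`o": "ò", "\\`O": "Ò",
--         "\\^o": "ô", "\\^O": "Ô",
--         "\\\"o": "ö", "\\\"O": "Ö",
--         "\\\'u": "ú", "\\\'U": "Ú",
--         "\\`u": "ù", "\\`U": "Ù",
--         "\\^u": "û", "\\^U": "Û",
--         "\\\"u": "ü", "\\\"U": "Ü",
--         "\\c c": "ç", "\\c C": "Ç",
--
--         # Others
--         "{\\o}": "ø", "{\\O}": "Ø",
--         "{\\aa}": "å", "{\\AA}": "Å",
--         "{\\ae}": "æ", "{\\AE}": "Æ",
--         "\\o": "ø", "\\O": "Ø",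
--         "\\aa": "å", "\\AA": "Å",
--         "\\ae": "æ", "\\AE": "Æ",
--     }
--
--     for old, new in replacements.items():
--         text = text.replace(old, new)
--
--     return text
-- ===== SOURCE B (Python) =====
-- """Single-pass variant: one compiled regex alternation (dict order = first-match priority)
-- replaces all LaTeX accent sequences in one left-to-right scan instead of 138 sequential passes."""
-- import re
--
-- _REPLACEMENTS = {
--     "{\\'e}": 'é',
--     "{\\'E}": 'É',
--     '{\\`e}': 'è',
--     '{\\`E}': 'È',
--     '{\\^e}': 'ê',
--     '{\\^E}': 'Ê',
--     '{\\"e}': 'ë',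
--     '{\\"E}': 'Ë',
--     "{'e}": 'é',
--     "{'E}": 'É',
--     '{`e}': 'è',
--     '{`E}': 'È',
--     '{^e}': 'ê',
--     '{^E}': 'Ê',
--     '{"e}': 'ë',
--     '{"E}': 'Ë',
--     "\\'e": 'é',
--     "\\'E": 'É',
--     '\\`e': 'è',
--     '\\`E': 'È',
--     '\\^e': 'ê',
--     '\\^E': 'Ê',
--     '\\"e': 'ë',
--     '\\"E': 'Ë',
--     "{\\'a}": 'á',
--     "{\\'A}": 'Á',
--     '{\\`a}': 'à',
--     '{\\`A}': 'À',
--     '{\\^a}': 'â',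
--     '{\\^A}': 'Â',
--     '{\\"a}': 'ä',
--     '{\\"A}': 'Ä',
--     "{\\'i}": 'í',
--     "{\\'I}": 'Í',
--     '{\\`i}': 'ì',
--     '{\\`I}': 'Ì',
--     '{\\^i}': 'î',
--     '{\\^I}': 'Î',
--     '{\\"i}': 'ï',
--     '{\\"I}': 'Ï',
--     "{\\'o}": 'ó',
--     "{\\'O}": 'Ó',
--     '{\\`o}': 'ò',
--     '{\\`O}': 'Ò',
--     '{\\^o}': 'ô',
--     '{\\^O}': 'Ô',
--     '{\\"o}': 'ö',
--     '{\\"O}': 'Ö',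
--     "{\\'u}": 'ú',
--     "{\\'U}": 'Ú',
--     '{\\`u}': 'ù',
--     '{\\`U}': 'Ù',
--     '{\\^u}': 'û',
--     '{\\^U}': 'Û',
--     '{\\"u}': 'ü',
--     '{\\"U}': 'Ü',
--     '{\\c c}': 'ç',
--     '{\\c C}': 'Ç',
--     "{'a}": 'á',
--     "{'A}": 'Á',
--     '{`a}': 'à',
--     '{`A}': 'À',
--     '{^a}': 'â',
--     '{^A}': 'Â',
--     '{"a}': 'ä',
--     '{"A}': 'Ä',
--     "{'i}": 'í',
--     "{'I}": 'Í',
--     '{`i}': 'ì',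
--     '{`I}': 'Ì',
--     '{^i}': 'î',
--     '{^I}': 'Î',
--     '{"i}': 'ï',
--     '{"I}': 'Ï',
--     "{'o}": 'ó',
--     "{'O}": 'Ó',
--     '{`o}': 'ò',
--     '{`O}': 'Ò',
--     '{^o}': 'ô',
--     '{^O}': 'Ô',
--     '{"o}': 'ö',
--     '{"O}': 'Ö',
--     "{'u}": 'ú',
--     "{'U}": 'Ú',
--     '{`u}': 'ù',
--     '{`U}': 'Ù',
--     '{^u}': 'û',
--     '{^U}': 'Û',
--     '{"u}': 'ü',
--     '{"U}': 'Ü',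
--     '{c c}': 'ç',
--     '{c C}': 'Ç',
--     "\\'a": 'á',
--     "\\'A": 'Á',
--     '\\`a': 'à',
--     '\\`A': 'À',
--     '\\^a': 'â',
--     '\\^A': 'Â',
--     '\\"a': 'ä',
--     '\\"A': 'Ä',
--     "\\'i": 'í',
--     "\\'I": 'Í',
--     '\\`i': 'ì',
--     '\\`I': 'Ì',
--     '\\^i': 'î',
--     '\\^I': 'Î',
--     '\\"i': 'ï',
--     '\\"I': 'Ï',
--     "\\'o": 'ó',
--     "\\'O": 'Ó',
--     '\\`o': 'ò',
--     '\\`O': 'Ò',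
--     '\\^o': 'ô',
--     '\\^O': 'Ô',
--     '\\"o': 'ö',
--     '\\"O': 'Ö',
--     "\\'u": 'ú',
--     "\\'U": 'Ú',
--     '\\`u': 'ù',
--     '\\`U': 'Ù',
--     '\\^u': 'û',
--     '\\^U': 'Û',
--     '\\"u': 'ü',
--     '\\"U': 'Ü',
--     '\\c c': 'ç',
--     '\\c C': 'Ç',
--     '{\\o}': 'ø',
--     '{\\O}': 'Ø',
--     '{\\aa}': 'å',
--     '{\\AA}': 'Å',
--     '{\\ae}': 'æ',
--     '{\\AE}': 'Æ',
--     '\\o': 'ø',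
--     '\\O': 'Ø',
--     '\\aa': 'å',
--     '\\AA': 'Å',
--     '\\ae': 'æ',
--     '\\AE': 'Æ',
-- }
--
-- _PATTERN = re.compile("|".join(re.escape(k) for k in _REPLACEMENTS))
--
--
-- def replace_special_characters(text):
--     """Replace LaTeX-style special characters with Unicode."""
--     return _PATTERN.sub(lambda m: _REPLACEMENTS[m.group(0)], text)
-- ===== Notes on version B (the rewrite author's own statement) =====
-- stated objective: idiomatic
-- what changed: Replaced 138 sequential full-string str.replace passes by one compiled regex alternation (patterns escaped, kept in dict order for first-match priority) applied in a single left-to-right scan with a callback lookup.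
import Mathlib
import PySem

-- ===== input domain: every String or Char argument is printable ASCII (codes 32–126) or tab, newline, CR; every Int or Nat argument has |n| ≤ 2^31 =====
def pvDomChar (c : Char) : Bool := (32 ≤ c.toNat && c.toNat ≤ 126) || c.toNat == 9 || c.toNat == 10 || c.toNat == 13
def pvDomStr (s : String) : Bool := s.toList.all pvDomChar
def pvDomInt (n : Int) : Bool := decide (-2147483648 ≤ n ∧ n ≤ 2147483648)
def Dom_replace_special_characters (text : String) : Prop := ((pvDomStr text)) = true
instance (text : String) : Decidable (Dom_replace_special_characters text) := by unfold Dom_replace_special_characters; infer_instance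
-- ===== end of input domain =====

-- B replaces A's 138 sequential full-string replace passes by ONE left-to-right scan that applies
-- the first matching pattern (in dict order) at each position — one pass instead of 138.

-- ===== PORT A =====
-- the replacements dict, in insertion (= items()) order
def pvTable : List (String × String) := [
  ("{\\'e}", "é"),
  ("{\\'E}", "É"),
  ("{\\`e}", "è"),
  ("{\\`E}", "È"),
  ("{\\^e}", "ê"),
  ("{\\^E}", "Ê"),
  ("{\\\"e}", "ë"),
  ("{\\\"E}", "Ë"),
  ("{'e}", "é"),
  ("{'E}", "É"),
  ("{`e}", "è"),
  ("{`E}", "È"),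
  ("{^e}", "ê"),
  ("{^E}", "Ê"),
  ("{\"e}", "ë"),
  ("{\"E}", "Ë"),
  ("\\'e", "é"),
  ("\\'E", "É"),
  ("\\`e", "è"),
  ("\\`E", "È"),
  ("\\^e", "ê"),
  ("\\^E", "Ê"),
  ("\\\"e", "ë"),
  ("\\\"E", "Ë"),
  ("{\\'a}", "á"),
  ("{\\'A}", "Á"),
  ("{\\`a}", "à"),
  ("{\\`A}", "À"),
  ("{\\^a}", "â"),
  ("{\\^A}", "Â"),
  ("{\\\"a}", "ä"),
  ("{\\\"A}", "Ä"),
  ("{\\'i}", "í"),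
  ("{\\'I}", "Í"),
  ("{\\`i}", "ì"),
  ("{\\`I}", "Ì"),
  ("{\\^i}", "î"),
  ("{\\^I}", "Î"),
  ("{\\\"i}", "ï"),
  ("{\\\"I}", "Ï"),
  ("{\\'o}", "ó"),
  ("{\\'O}", "Ó"),
  ("{\\`o}", "ò"),
  ("{\\`O}", "Ò"),
  ("{\\^o}", "ô"),
  ("{\\^O}", "Ô"),
  ("{\\\"o}", "ö"),
  ("{\\\"O}", "Ö"),
  ("{\\'u}", "ú"),
  ("{\\'U}", "Ú"),
  ("{\\`u}", "ù"),
  ("{\\`U}", "Ù"),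
  ("{\\^u}", "û"),
  ("{\\^U}", "Û"),
  ("{\\\"u}", "ü"),
  ("{\\\"U}", "Ü"),
  ("{\\c c}", "ç"),
  ("{\\c C}", "Ç"),
  ("{'a}", "á"),
  ("{'A}", "Á"),
  ("{`a}", "à"),
  ("{`A}", "À"),
  ("{^a}", "â"),
  ("{^A}", "Â"),
  ("{\"a}", "ä"),
  ("{\"A}", "Ä"),
  ("{'i}", "í"),
  ("{'I}", "Í"),
  ("{`i}", "ì"),
  ("{`I}", "Ì"),
  ("{^i}", "î"),
  ("{^I}", "Î"),
  ("{\"i}", "ï"),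
  ("{\"I}", "Ï"),
  ("{'o}", "ó"),
  ("{'O}", "Ó"),
  ("{`o}", "ò"),
  ("{`O}", "Ò"),
  ("{^o}", "ô"),
  ("{^O}", "Ô"),
  ("{\"o}", "ö"),
  ("{\"O}", "Ö"),
  ("{'u}", "ú"),
  ("{'U}", "Ú"),
  ("{`u}", "ù"),
  ("{`U}", "Ù"),
  ("{^u}", "û"),
  ("{^U}", "Û"),
  ("{\"u}", "ü"),
  ("{\"U}", "Ü"),
  ("{c c}", "ç"),
  ("{c C}", "Ç"),
  ("\\'a", "á"),
  ("\\'A", "Á"),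
  ("\\`a", "à"),
  ("\\`A", "À"),
  ("\\^a", "â"),
  ("\\^A", "Â"),
  ("\\\"a", "ä"),
  ("\\\"A", "Ä"),
  ("\\'i", "í"),
  ("\\'I", "Í"),
  ("\\`i", "ì"),
  ("\\`I", "Ì"),
  ("\\^i", "î"),
  ("\\^I", "Î"),
  ("\\\"i", "ï"),
  ("\\\"I", "Ï"),
  ("\\'o", "ó"),
  ("\\'O", "Ó"),
  ("\\`o", "ò"),
  ("\\`O", "Ò"),
  ("\\^o", "ô"),
  ("\\^O", "Ô"),
  ("\\\"o", "ö"),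
  ("\\\"O", "Ö"),
  ("\\'u", "ú"),
  ("\\'U", "Ú"),
  ("\\`u", "ù"),
  ("\\`U", "Ù"),
  ("\\^u", "û"),
  ("\\^U", "Û"),
  ("\\\"u", "ü"),
  ("\\\"U", "Ü"),
  ("\\c c", "ç"),
  ("\\c C", "Ç"),
  ("{\\o}", "ø"),
  ("{\\O}", "Ø"),
  ("{\\aa}", "å"),
  ("{\\AA}", "Å"),
  ("{\\ae}", "æ"),
  ("{\\AE}", "Æ"),
  ("\\o", "ø"),
  ("\\O", "Ø"),
  ("\\aa", "å"),
  ("\\AA", "Å"),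
  ("\\ae", "æ"),
  ("\\AE", "Æ")]


-- for old, new in replacements.items(): text = text.replace(old, new)
def replace_special_characters (text : String) : String :=
  pvTable.foldl (fun t pr => PySem.Str.replace t pr.1 pr.2) text

-- ===== PORT B =====
-- the compiled alternation re.compile("|".join(re.escape(k) ...)): the same patterns (escaping is
-- identity on the match semantics of these literals), in dict order = first-match priority,
-- paired with their replacements; written as char lists
def pvPats : List (List Char × List Char) := [
  (['{', '\\', '\'', 'e', '}'], ['é']),
  (['{', '\\', '\'', 'E', '}'], ['É']),
  (['{', '\\', '`', 'e', '}'], ['è']),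
  (['{', '\\', '`', 'E', '}'], ['È']),
  (['{', '\\', '^', 'e', '}'], ['ê']),
  (['{', '\\', '^', 'E', '}'], ['Ê']),
  (['{', '\\', '\"', 'e', '}'], ['ë']),
  (['{', '\\', '\"', 'E', '}'], ['Ë']),
  (['{', '\'', 'e', '}'], ['é']),
  (['{', '\'', 'E', '}'], ['É']),
  (['{', '`', 'e', '}'], ['è']),
  (['{', '`', 'E', '}'], ['È']),
  (['{', '^', 'e', '}'], ['ê']),
  (['{', '^', 'E', '}'], ['Ê']),
  (['{', '\"', 'e', '}'], ['ë']),
  (['{', '\"', 'E', '}'], ['Ë']),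
  (['\\', '\'', 'e'], ['é']),
  (['\\', '\'', 'E'], ['É']),
  (['\\', '`', 'e'], ['è']),
  (['\\', '`', 'E'], ['È']),
  (['\\', '^', 'e'], ['ê']),
  (['\\', '^', 'E'], ['Ê']),
  (['\\', '\"', 'e'], ['ë']),
  (['\\', '\"', 'E'], ['Ë']),
  (['{', '\\', '\'', 'a', '}'], ['á']),
  (['{', '\\', '\'', 'A', '}'], ['Á']),
  (['{', '\\', '`', 'a', '}'], ['à']),
  (['{', '\\', '`', 'A', '}'], ['À']),
  (['{', '\\', '^', 'a', '}'], ['â']),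
  (['{', '\\', '^', 'A', '}'], ['Â']),
  (['{', '\\', '\"', 'a', '}'], ['ä']),
  (['{', '\\', '\"', 'A', '}'], ['Ä']),
  (['{', '\\', '\'', 'i', '}'], ['í']),
  (['{', '\\', '\'', 'I', '}'], ['Í']),
  (['{', '\\', '`', 'i', '}'], ['ì']),
  (['{', '\\', '`', 'I', '}'], ['Ì']),
  (['{', '\\', '^', 'i', '}'], ['î']),
  (['{', '\\', '^', 'I', '}'], ['Î']),
  (['{', '\\', '\"', 'i', '}'], ['ï']),
  (['{', '\\', '\"', 'I', '}'], ['Ï']),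
  (['{', '\\', '\'', 'o', '}'], ['ó']),
  (['{', '\\', '\'', 'O', '}'], ['Ó']),
  (['{', '\\', '`', 'o', '}'], ['ò']),
  (['{', '\\', '`', 'O', '}'], ['Ò']),
  (['{', '\\', '^', 'o', '}'], ['ô']),
  (['{', '\\', '^', 'O', '}'], ['Ô']),
  (['{', '\\', '\"', 'o', '}'], ['ö']),
  (['{', '\\', '\"', 'O', '}'], ['Ö']),
  (['{', '\\', '\'', 'u', '}'], ['ú']),
  (['{', '\\', '\'', 'U', '}'], ['Ú']),
  (['{', '\\', '`', 'u', '}'], ['ù']),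
  (['{', '\\', '`', 'U', '}'], ['Ù']),
  (['{', '\\', '^', 'u', '}'], ['û']),
  (['{', '\\', '^', 'U', '}'], ['Û']),
  (['{', '\\', '\"', 'u', '}'], ['ü']),
  (['{', '\\', '\"', 'U', '}'], ['Ü']),
  (['{', '\\', 'c', ' ', 'c', '}'], ['ç']),
  (['{', '\\', 'c', ' ', 'C', '}'], ['Ç']),
  (['{', '\'', 'a', '}'], ['á']),
  (['{', '\'', 'A', '}'], ['Á']),
  (['{', '`', 'a', '}'], ['à']),
  (['{', '`', 'A', '}'], ['À']),
  (['{', '^', 'a', '}'], ['â']),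
  (['{', '^', 'A', '}'], ['Â']),
  (['{', '\"', 'a', '}'], ['ä']),
  (['{', '\"', 'A', '}'], ['Ä']),
  (['{', '\'', 'i', '}'], ['í']),
  (['{', '\'', 'I', '}'], ['Í']),
  (['{', '`', 'i', '}'], ['ì']),
  (['{', '`', 'I', '}'], ['Ì']),
  (['{', '^', 'i', '}'], ['î']),
  (['{', '^', 'I', '}'], ['Î']),
  (['{', '\"', 'i', '}'], ['ï']),
  (['{', '\"', 'I', '}'], ['Ï']),
  (['{', '\'', 'o', '}'], ['ó']),
  (['{', '\'', 'O', '}'], ['Ó']),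
  (['{', '`', 'o', '}'], ['ò']),
  (['{', '`', 'O', '}'], ['Ò']),
  (['{', '^', 'o', '}'], ['ô']),
  (['{', '^', 'O', '}'], ['Ô']),
  (['{', '\"', 'o', '}'], ['ö']),
  (['{', '\"', 'O', '}'], ['Ö']),
  (['{', '\'', 'u', '}'], ['ú']),
  (['{', '\'', 'U', '}'], ['Ú']),
  (['{', '`', 'u', '}'], ['ù']),
  (['{', '`', 'U', '}'], ['Ù']),
  (['{', '^', 'u', '}'], ['û']),
  (['{', '^', 'U', '}'], ['Û']),
  (['{', '\"', 'u', '}'], ['ü']),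
  (['{', '\"', 'U', '}'], ['Ü']),
  (['{', 'c', ' ', 'c', '}'], ['ç']),
  (['{', 'c', ' ', 'C', '}'], ['Ç']),
  (['\\', '\'', 'a'], ['á']),
  (['\\', '\'', 'A'], ['Á']),
  (['\\', '`', 'a'], ['à']),
  (['\\', '`', 'A'], ['À']),
  (['\\', '^', 'a'], ['â']),
  (['\\', '^', 'A'], ['Â']),
  (['\\', '\"', 'a'], ['ä']),
  (['\\', '\"', 'A'], ['Ä']),
  (['\\', '\'', 'i'], ['í']),
  (['\\', '\'', 'I'], ['Í']),
  (['\\', '`', 'i'], ['ì']),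
  (['\\', '`', 'I'], ['Ì']),
  (['\\', '^', 'i'], ['î']),
  (['\\', '^', 'I'], ['Î']),
  (['\\', '\"', 'i'], ['ï']),
  (['\\', '\"', 'I'], ['Ï']),
  (['\\', '\'', 'o'], ['ó']),
  (['\\', '\'', 'O'], ['Ó']),
  (['\\', '`', 'o'], ['ò']),
  (['\\', '`', 'O'], ['Ò']),
  (['\\', '^', 'o'], ['ô']),
  (['\\', '^', 'O'], ['Ô']),
  (['\\', '\"', 'o'], ['ö']),
  (['\\', '\"', 'O'], ['Ö']),
  (['\\', '\'', 'u'], ['ú']),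
  (['\\', '\'', 'U'], ['Ú']),
  (['\\', '`', 'u'], ['ù']),
  (['\\', '`', 'U'], ['Ù']),
  (['\\', '^', 'u'], ['û']),
  (['\\', '^', 'U'], ['Û']),
  (['\\', '\"', 'u'], ['ü']),
  (['\\', '\"', 'U'], ['Ü']),
  (['\\', 'c', ' ', 'c'], ['ç']),
  (['\\', 'c', ' ', 'C'], ['Ç']),
  (['{', '\\', 'o', '}'], ['ø']),
  (['{', '\\', 'O', '}'], ['Ø']),
  (['{', '\\', 'a', 'a', '}'], ['å']),
  (['{', '\\', 'A', 'A', '}'], ['Å']),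
  (['{', '\\', 'a', 'e', '}'], ['æ']),
  (['{', '\\', 'A', 'E', '}'], ['Æ']),
  (['\\', 'o'], ['ø']),
  (['\\', 'O'], ['Ø']),
  (['\\', 'a', 'a'], ['å']),
  (['\\', 'A', 'A'], ['Å']),
  (['\\', 'a', 'e'], ['æ']),
  (['\\', 'A', 'E'], ['Æ'])]

-- re.sub with this alternation of literals: a single left-to-right scan; at each position the FIRST
-- pattern (in list order) that matches is replaced and the scan resumes after the replacement.
-- Exact for an alternation of escaped literals (Python re picks the first matching alternative).
-- fuel = remaining length bound; every pattern is nonempty, so fuel s.length suffices.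
def pvScanF : Nat → List Char → List Char
  | _, [] => []
  | 0, c :: t => c :: t
  | fuel+1, c :: t =>
    match pvPats.find? (fun pr => pr.1.isPrefixOf (c :: t)) with
    | some pr => pr.2 ++ pvScanF fuel ((c :: t).drop pr.1.length)
    | none => c :: pvScanF fuel t

def replace_special_characters_alt (text : String) : String :=
  String.ofList (pvScanF text.toList.length text.toList)

-- ===== PRECONDITION & SPEC =====
def Spec_replace_special_characters (text : String) (out : String) : Prop := out = replace_special_characters_alt text
instance (text : String) (out : String) : Decidable (Spec_replace_special_characters text out) := by unfold Spec_replace_special_characters; infer_instance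

-- ===== CLAIM (what is proved, stated in full; the proofs are below) =====
def Claim_equal_replace_special_characters : Prop := ∀ (text : String), Dom_replace_special_characters text → Spec_replace_special_characters text (replace_special_characters text)

-- ===== LEMMAS AND PROOFS =====

-- ASCII test: every pattern char is ASCII, every replacement char is not
def pvAsc (c : Char) : Bool := c.toNat < 128
-- neither list is a prefix of the other
def pvNoPre (a b : List Char) : Bool := !(a.isPrefixOf b) && !(b.isPrefixOf a)
-- a (an EARLIER pattern) is prefix-incompatible with b and with every proper suffix chunk of b
def pvOk (a b : List Char) : Bool := pvNoPre a b && (List.range b.length).all (fun i => i == 0 || pvNoPre a (b.drop i))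

-- static facts about the 138 patterns, checked by computation
set_option maxHeartbeats 2000000 in
set_option maxRecDepth 10000 in
theorem pvOk_pairwise : (pvPats.map Prod.fst).Pairwise (fun a b => pvOk a b = true) := by decide

set_option maxRecDepth 10000 in
theorem pvGoodB : pvPats.all (fun pr => !pr.1.isEmpty && pr.1.all pvAsc && !pr.2.isEmpty && pr.2.all (fun c => !pvAsc c)) = true := by decide

theorem pvGood : ∀ pr ∈ pvPats, pr.1 ≠ [] ∧ pr.2 ≠ [] ∧ (∀ c ∈ pr.1, pvAsc c = true) ∧ (∀ c ∈ pr.2, pvAsc c = false) := by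
  intro pr hpr
  have h := List.all_eq_true.mp pvGoodB pr hpr
  simp only [Bool.and_eq_true, Bool.not_eq_true', List.isEmpty_eq_false_iff,
    List.all_eq_true] at h
  exact ⟨h.1.1.1, h.1.2, h.1.1.2, h.2⟩

set_option maxRecDepth 10000 in
theorem pvSame : pvPats = pvTable.map (fun pr => (pr.1.toList, pr.2.toList)) := by decide

set_option maxRecDepth 10000 in
theorem pvTable_neB : pvTable.all (fun q => !q.1.toList.isEmpty) = true := by decide

theorem pvTable_ne : ∀ q ∈ pvTable, q.1.toList ≠ [] := by
  intro q hq
  have h := List.all_eq_true.mp pvTable_neB q hq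
  simpa using h

-- clean fueled form of PySem.Chars.replace.go (accumulator removed)
def pvRepl (o n : List Char) : Nat → List Char → List Char
  | 0, l => l
  | _+1, [] => []
  | fuel+1, c :: t => if o.isPrefixOf (c :: t) then n ++ pvRepl o n fuel ((c :: t).drop o.length) else c :: pvRepl o n fuel t

theorem pvRepl_go_eq (o n : List Char) : ∀ (fuel : Nat) (l acc : List Char),
    PySem.Chars.replace.go o n fuel l acc = acc.reverse ++ pvRepl o n fuel l := by
  intro fuel
  induction fuel with
  | zero => intro l acc; cases l <;> simp [PySem.Chars.replace.go, pvRepl]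
  | succ f ih =>
    intro l acc
    cases l with
    | nil => simp [PySem.Chars.replace.go, pvRepl]
    | cons c t =>
      rw [PySem.Chars.replace.go, pvRepl]
      split <;> rw [ih] <;> simp

-- str.replace(old, new) with nonempty old, as the clean recursion at fuel = length
theorem pvReplace_eq (o n s : List Char) (ho : o ≠ []) :
    PySem.Chars.replace s o n = pvRepl o n s.length s := by
  rw [PySem.Chars.replace, if_neg (by simpa using ho), pvRepl_go_eq]
  simp

def pvR (o n l : List Char) : List Char := pvRepl o n l.length l

theorem pvLen_pos (o : List Char) (ho : o ≠ []) : 1 ≤ o.length := by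
  cases o with
  | nil => exact absurd rfl ho
  | cons _ _ => simp

theorem pvRepl_fuel (o n : List Char) (ho : o ≠ []) :
    ∀ m fuel l, l.length ≤ m → l.length ≤ fuel → pvRepl o n fuel l = pvR o n l := by
  intro m
  induction m with
  | zero =>
    intro fuel l hm _
    rw [List.length_eq_zero_iff.mp (Nat.le_zero.mp hm)]
    cases fuel <;> rfl
  | succ m ih =>
    intro fuel l hm hf
    cases l with
    | nil => cases fuel <;> rfl
    | cons c t =>
      obtain ⟨f, rfl⟩ : ∃ f, fuel = f + 1 := ⟨fuel - 1, by simp at hf; omega⟩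
      have hol := pvLen_pos o ho
      have hlc : (c :: t).length = t.length + 1 := by simp
      rw [pvR, hlc, pvRepl, pvRepl]
      by_cases hp : o.isPrefixOf (c :: t)
      · rw [if_pos hp, if_pos hp]
        have h1 : ((c :: t).drop o.length).length ≤ m := by
          rw [List.length_drop, hlc]; simp at hm; omega
        rw [ih f _ h1 (by rw [List.length_drop, hlc]; simp at hf; omega),
            ih t.length _ h1 (by rw [List.length_drop, hlc]; omega)]
      · rw [if_neg hp, if_neg hp,
            ih f t (by simp at hm; omega) (by simp at hf; omega),
            ih t.length t (by simp at hm; omega) le_rfl]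

theorem pvR_nil (o n : List Char) : pvR o n [] = [] := rfl

theorem pvR_pos (o n l : List Char) (ho : o ≠ []) (h : o <+: l) :
    pvR o n l = n ++ pvR o n (l.drop o.length) := by
  cases l with
  | nil => exact absurd (List.prefix_nil.mp h) ho
  | cons c t =>
    rw [pvR, show (c :: t).length = t.length + 1 by simp, pvRepl,
        if_pos (List.isPrefixOf_iff_prefix.mpr h)]
    congr 1
    exact pvRepl_fuel o n ho ((c :: t).drop o.length).length _ _ le_rfl
      (by rw [List.length_drop]; have := pvLen_pos o ho; simp; omega)

theorem pvR_neg (o n : List Char) (c : Char) (t : List Char) (ho : o ≠ [])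
    (h : ¬ o <+: (c :: t)) : pvR o n (c :: t) = c :: pvR o n t := by
  rw [pvR, show (c :: t).length = t.length + 1 by simp, pvRepl,
      if_neg (fun hb => h (List.isPrefixOf_iff_prefix.mp hb))]
  rw [pvRepl_fuel o n ho t.length t.length t le_rfl le_rfl]

-- a prefix of an append is comparable with the left part
theorem pvPrefix_or (a b v : List Char) (h : a <+: b ++ v) : a <+: b ∨ b <+: a :=
  List.prefix_or_prefix_of_prefix h (List.prefix_append b v)

-- an ASCII list that prefixes a replaced string already prefixes the original
-- (inserted replacement chars are non-ASCII, so an ASCII prefix cannot reach past a replacement)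
theorem pvAscii_prefix (o n : List Char) (ho : o ≠ []) (hn : n ≠ [])
    (hna : ∀ c ∈ n, pvAsc c = false) :
    ∀ m s q, s.length ≤ m → (∀ c ∈ q, pvAsc c = true) → q <+: pvR o n s → q <+: s := by
  intro m
  induction m with
  | zero =>
    intro s q hm _ h
    rw [List.length_eq_zero_iff.mp (Nat.le_zero.mp hm)] at *
    simpa [pvR_nil] using h
  | succ m ih =>
    intro s q hm hq h
    by_cases hp : o <+: s
    · rw [pvR_pos o n s ho hp] at h
      cases q with
      | nil => exact List.nil_prefix
      | cons d q' =>
        exfalso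
        have hd : d ∈ n := by
          rcases pvPrefix_or _ _ _ h with h2 | h2 <;>
            cases n with
            | nil => exact absurd rfl hn
            | cons e n' => rw [List.cons_prefix_cons] at h2; simp [h2.1]
        have h5 := hna d hd
        have h6 := hq d List.mem_cons_self
        rw [h5] at h6; exact Bool.false_ne_true h6
    · cases s with
      | nil => rw [pvR_nil] at h; rw [List.prefix_nil.mp h]
      | cons c t =>
        rw [pvR_neg o n c t ho hp] at h
        cases q with
        | nil => exact List.nil_prefix
        | cons d q' =>
          rw [List.cons_prefix_cons] at h ⊢
          exact ⟨h.1, ih t q' (by simp at hm; omega)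
            (fun e he => hq e (List.mem_cons_of_mem d he)) h.2⟩

def pvFold (ps : List (List Char × List Char)) (s : List Char) : List Char :=
  ps.foldl (fun acc pr => pvR pr.1 pr.2 acc) s

theorem pvFold_append (ps qs : List (List Char × List Char)) (s : List Char) :
    pvFold (ps ++ qs) s = pvFold qs (pvFold ps s) := List.foldl_append

theorem pvFold_nil (ps : List (List Char × List Char)) : pvFold ps [] = [] := by
  induction ps with
  | nil => rfl
  | cons pr ps ih => simpa [pvFold, pvR_nil] using ih

-- when no pattern matches at the front, every pass keeps the head char
theorem pvFold_cons (ps : List (List Char × List Char))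
    (hps : ∀ pr ∈ ps, pr.1 ≠ [] ∧ pr.2 ≠ [] ∧ (∀ c ∈ pr.1, pvAsc c = true) ∧ (∀ c ∈ pr.2, pvAsc c = false))
    (c : Char) : ∀ t, (∀ pr ∈ ps, ¬ pr.1 <+: (c :: t)) → pvFold ps (c :: t) = c :: pvFold ps t := by
  induction ps with
  | nil => intro t _; rfl
  | cons pr ps ih =>
    intro t h
    obtain ⟨h1, h2, h3, h4⟩ := hps pr List.mem_cons_self
    have hstep : pvR pr.1 pr.2 (c :: t) = c :: pvR pr.1 pr.2 t :=
      pvR_neg pr.1 pr.2 c t h1 (h pr List.mem_cons_self)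
    show pvFold ps (pvR pr.1 pr.2 (c :: t)) = c :: pvFold ps (pvR pr.1 pr.2 t)
    rw [hstep]
    refine ih (fun q hq => hps q (List.mem_cons_of_mem pr hq)) (pvR pr.1 pr.2 t) ?_
    intro q hq hpre
    obtain ⟨q1, q2, q3, q4⟩ := hps q (List.mem_cons_of_mem pr hq)
    cases hq1 : q.1 with
    | nil => exact q1 hq1
    | cons d q' =>
      rw [hq1, List.cons_prefix_cons] at hpre
      have hqt : q' <+: t := by
        refine pvAscii_prefix pr.1 pr.2 h1 h2 h4 t.length t q' le_rfl ?_ hpre.2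
        intro e he; exact q3 e (by rw [hq1]; exact List.mem_cons_of_mem d he)
      exact h q (List.mem_cons_of_mem pr hq)
        (by rw [hq1, hpre.1]; exact List.cons_prefix_cons.mpr ⟨rfl, hqt⟩)

-- a pass cannot touch a region u none of whose suffix chunks is prefix-compatible with the pattern
theorem pvR_skip (o n : List Char) (ho : o ≠ []) :
    ∀ u v, (∀ i, i < u.length → ¬ o <+: u.drop i ∧ ¬ u.drop i <+: o) →
    pvR o n (u ++ v) = u ++ pvR o n v := by
  intro u
  induction u with
  | nil => intro v _; rfl
  | cons c u' ih =>
    intro v h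
    have h0 := h 0 (by simp)
    simp only [List.drop_zero] at h0
    have hnp : ¬ o <+: c :: (u' ++ v) := by
      intro hp
      rcases pvPrefix_or o (c :: u') v (by simpa using hp) with h2 | h2
      · exact h0.1 h2
      · exact h0.2 h2
    rw [List.cons_append, pvR_neg o n c (u' ++ v) ho hnp,
        ih v (fun i hi => by simpa using h (i + 1) (by simpa using Nat.succ_lt_succ hi))]
    simp

theorem pvFold_skip (ps : List (List Char × List Char)) (hne : ∀ pr ∈ ps, pr.1 ≠ []) :
    ∀ u v, (∀ pr ∈ ps, ∀ i, i < u.length → ¬ pr.1 <+: u.drop i ∧ ¬ u.drop i <+: pr.1) →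
    pvFold ps (u ++ v) = u ++ pvFold ps v := by
  induction ps with
  | nil => intro u v _; rfl
  | cons pr ps ih =>
    intro u v h
    show pvFold ps (pvR pr.1 pr.2 (u ++ v)) = u ++ pvFold ps (pvR pr.1 pr.2 v)
    rw [pvR_skip pr.1 pr.2 (hne pr List.mem_cons_self) u v (h pr List.mem_cons_self)]
    exact ih (fun q hq => hne q (List.mem_cons_of_mem pr hq)) u (pvR pr.1 pr.2 v)
      (fun q hq => h q (List.mem_cons_of_mem pr hq))

-- an (ASCII, non-ASCII) char mismatch kills prefix-compatibility in both directions
theorem pvMismatch (a b : List Char) (ha : a ≠ []) (hb : b ≠ [])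
    (hA : ∀ c ∈ a, pvAsc c = true) (hB : ∀ c ∈ b, pvAsc c = false) :
    ¬ a <+: b ∧ ¬ b <+: a := by
  cases a with
  | nil => exact absurd rfl ha
  | cons ca a' =>
    cases b with
    | nil => exact absurd rfl hb
    | cons cb b' =>
      have h1 := hA ca List.mem_cons_self
      have h2 := hB cb List.mem_cons_self
      constructor <;> intro hp <;> rw [List.cons_prefix_cons] at hp
      · rw [hp.1, h2] at h1; exact Bool.false_ne_true h1
      · rw [← hp.1, h2] at h1; exact Bool.false_ne_true h1

theorem pvOk_elim (a b : List Char) (h : pvOk a b = true) :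
    ∀ i, i < b.length → ¬ a <+: b.drop i ∧ ¬ b.drop i <+: a := by
  simp only [pvOk, pvNoPre, Bool.and_eq_true, List.all_eq_true, List.mem_range] at h
  intro i hi
  rcases Nat.eq_zero_or_pos i with rfl | hpos
  · simp only [List.drop_zero]
    constructor <;> intro hp
    · rw [List.isPrefixOf_iff_prefix.mpr hp] at h; simp at h
    · rw [List.isPrefixOf_iff_prefix.mpr hp] at h; simp at h
  · have h2 := h.2 i hi
    rw [Bool.or_eq_true] at h2
    rcases h2 with h2 | h2
    · exact absurd (by simpa using h2) (by omega)
    · rw [Bool.and_eq_true] at h2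
      constructor <;> intro hp
      · rw [List.isPrefixOf_iff_prefix.mpr hp] at h2; simp at h2
      · rw [List.isPrefixOf_iff_prefix.mpr hp] at h2; simp at h2

-- scan fuel irrelevance
theorem pvScanF_fuel : ∀ m fuel l, l.length ≤ m → l.length ≤ fuel →
    pvScanF fuel l = pvScanF l.length l := by
  intro m
  induction m with
  | zero =>
    intro fuel l hm _
    rw [List.length_eq_zero_iff.mp (Nat.le_zero.mp hm)]
    cases fuel <;> rfl
  | succ m ih =>
    intro fuel l hm hf
    cases l with
    | nil => cases fuel <;> rfl
    | cons c t =>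
      obtain ⟨f, rfl⟩ : ∃ f, fuel = f + 1 := ⟨fuel - 1, by simp at hf; omega⟩
      rw [show (c :: t).length = t.length + 1 by simp]
      cases hfind : pvPats.find? (fun pr => pr.1.isPrefixOf (c :: t)) with
      | none =>
        simp only [pvScanF, hfind]
        rw [ih f t (by simp at hm; omega) (by simp at hf; omega),
            ih t.length t (by simp at hm; omega) le_rfl]
      | some pr =>
        simp only [pvScanF, hfind]
        have hmem := List.mem_of_find?_eq_some hfind
        have hlen := pvLen_pos pr.1 (pvGood pr hmem).1
        have hd : ((c :: t).drop pr.1.length).length ≤ m := by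
          rw [List.length_drop]; simp at hm ⊢; omega
        rw [ih f _ hd (by rw [List.length_drop] at *; simp at hf ⊢; omega),
            ih t.length _ hd (by rw [List.length_drop]; simp; omega)]

def pvScan (l : List Char) : List Char := pvScanF l.length l

theorem pvScan_none (c : Char) (t : List Char)
    (h : pvPats.find? (fun pr => pr.1.isPrefixOf (c :: t)) = none) :
    pvScan (c :: t) = c :: pvScan t := by
  rw [pvScan, show (c :: t).length = t.length + 1 by simp]
  simp only [pvScanF, h]
  rfl

theorem pvScan_some (c : Char) (t : List Char) (pr : List Char × List Char)
    (h : pvPats.find? (fun pr => pr.1.isPrefixOf (c :: t)) = some pr) :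
    pvScan (c :: t) = pr.2 ++ pvScan ((c :: t).drop pr.1.length) := by
  have hmem := List.mem_of_find?_eq_some h
  have hlen := pvLen_pos pr.1 (pvGood pr hmem).1
  rw [pvScan, show (c :: t).length = t.length + 1 by simp]
  simp only [pvScanF, h]
  congr 1
  exact pvScanF_fuel ((c :: t).drop pr.1.length).length _ _ le_rfl
    (by rw [List.length_drop]; simp; omega)

-- MAIN LEMMA: the 138 sequential passes equal the single first-match scan
theorem pvMain : ∀ m l, l.length ≤ m → pvFold pvPats l = pvScan l := by
  intro m
  induction m with
  | zero =>
    intro l hm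
    rw [List.length_eq_zero_iff.mp (Nat.le_zero.mp hm), pvFold_nil]
    rfl
  | succ m ih =>
    intro l hm
    cases l with
    | nil => rw [pvFold_nil]; rfl
    | cons c t =>
      cases hfind : pvPats.find? (fun pr => pr.1.isPrefixOf (c :: t)) with
      | none =>
        have hnp : ∀ pr ∈ pvPats, ¬ pr.1 <+: (c :: t) := by
          intro pr hpr hp
          have := List.find?_eq_none.mp hfind pr hpr
          rw [List.isPrefixOf_iff_prefix.mpr hp] at this
          exact this rfl
        rw [pvFold_cons pvPats pvGood c t hnp, ih t (by simp at hm; omega), pvScan_none c t hfind]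
      | some pr =>
        have hmem := List.mem_of_find?_eq_some hfind
        obtain ⟨g1, g2, g3, g4⟩ := pvGood pr hmem
        have hlen := pvLen_pos pr.1 g1
        obtain ⟨hpred, pre, post, hsplit, -⟩ := List.find?_eq_some_iff_append.mp hfind
        have hp : pr.1 <+: (c :: t) := List.isPrefixOf_iff_prefix.mp hpred
        obtain ⟨rest, hrest⟩ := hp
        have hrestd : rest = (c :: t).drop pr.1.length := by rw [← hrest, List.drop_left]
        have hprem : ∀ q ∈ pre, q ∈ pvPats := fun q hq => by
          rw [hsplit]; exact List.mem_append_left _ hq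
        have hpostm : ∀ q ∈ post, q ∈ pvPats := fun q hq => by
          rw [hsplit]; exact List.mem_append_right _ (List.mem_cons_of_mem pr hq)
        -- prefix-incompatibility of every earlier pattern with pr.1 and its chunks
        have hpw := pvOk_pairwise
        rw [hsplit, List.map_append, List.map_cons, List.pairwise_append] at hpw
        have hskip1 : ∀ q ∈ pre, ∀ i, i < pr.1.length →
            ¬ q.1 <+: pr.1.drop i ∧ ¬ pr.1.drop i <+: q.1 := by
          intro q hq
          exact pvOk_elim q.1 pr.1
            (hpw.2.2 q.1 (List.mem_map_of_mem hq) pr.1 List.mem_cons_self)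
        -- the replaced (non-ASCII) block pr.2 is untouchable by the later passes
        have hskip2 : ∀ q ∈ post, ∀ i, i < pr.2.length →
            ¬ q.1 <+: pr.2.drop i ∧ ¬ pr.2.drop i <+: q.1 := by
          intro q hq i hi
          obtain ⟨w1, w2, w3, w4⟩ := pvGood q (hpostm q hq)
          refine pvMismatch q.1 (pr.2.drop i) w1 ?_ w3 ?_
          · intro hdrop
            have : (pr.2.drop i).length = 0 := by rw [hdrop]; rfl
            rw [List.length_drop] at this; omega
          · intro e he; exact g4 e (List.mem_of_mem_drop he)
        have hrl : rest.length ≤ m := by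
          have := congrArg List.length hrest
          simp [List.length_append] at this ⊢
          simp at hm; omega
        calc pvFold pvPats (c :: t)
            = pvFold (pre ++ pr :: post) (pr.1 ++ rest) := by rw [← hsplit, hrest]
          _ = pvFold (pr :: post) (pvFold pre (pr.1 ++ rest)) := pvFold_append _ _ _
          _ = pvFold (pr :: post) (pr.1 ++ pvFold pre rest) := by
              rw [pvFold_skip pre (fun q hq => (pvGood q (hprem q hq)).1) pr.1 rest
                (fun q hq => hskip1 q hq)]
          _ = pvFold post (pvR pr.1 pr.2 (pr.1 ++ pvFold pre rest)) := rfl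
          _ = pvFold post (pr.2 ++ pvR pr.1 pr.2 (pvFold pre rest)) := by
              rw [pvR_pos pr.1 pr.2 _ g1 (List.prefix_append pr.1 _), List.drop_left]
          _ = pr.2 ++ pvFold post (pvR pr.1 pr.2 (pvFold pre rest)) := by
              rw [pvFold_skip post (fun q hq => (pvGood q (hpostm q hq)).1) pr.2 _
                (fun q hq => hskip2 q hq)]
          _ = pr.2 ++ pvFold (pr :: post) (pvFold pre rest) := rfl
          _ = pr.2 ++ pvFold pvPats rest := by rw [← pvFold_append, ← hsplit]
          _ = pr.2 ++ pvScan rest := by rw [ih rest hrl]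
          _ = pvScan (c :: t) := by rw [pvScan_some c t pr hfind, hrestd]

-- A's foldl of str.replace, moved to the char-list side
theorem pvFold_bridge : ∀ (tbl : List (String × String)), (∀ q ∈ tbl, q.1.toList ≠ []) →
    ∀ s : String,
    (tbl.foldl (fun t pr => PySem.Str.replace t pr.1 pr.2) s).toList
      = pvFold (tbl.map fun pr => (pr.1.toList, pr.2.toList)) s.toList := by
  intro tbl
  induction tbl with
  | nil => intro _ s; rfl
  | cons q tbl ih =>
    intro h s
    have hstep : (PySem.Str.replace s q.1 q.2).toList = pvR q.1.toList q.2.toList s.toList := by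
      rw [PySem.Str.replace, String.toList_ofList,
          pvReplace_eq _ _ _ (h q List.mem_cons_self)]
      rfl
    show (tbl.foldl _ (PySem.Str.replace s q.1 q.2)).toList
        = pvFold (tbl.map _) (pvR q.1.toList q.2.toList s.toList)
    rw [ih (fun r hr => h r (List.mem_cons_of_mem q hr)) (PySem.Str.replace s q.1 q.2), hstep]

-- ===== VERDICT (by name: the statement is the Claim_ definition above) =====
theorem replace_special_characters_spec : Claim_equal_replace_special_characters := by
  unfold Claim_equal_replace_special_characters Spec_replace_special_characters
  intro text _
  have h1 : (replace_special_characters text).toList = pvScan text.toList := by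
    rw [replace_special_characters, pvFold_bridge pvTable pvTable_ne text, ← pvSame,
        pvMain text.toList.length text.toList le_rfl]
  have h2 : replace_special_characters_alt text = String.ofList (pvScan text.toList) := rfl
  rw [h2, ← h1, String.ofList_toList]
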